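-- pv_equiv track=rewrite | github.com/seolmango/test | 다항식 표현/polynomial.py | sumTuples
-- ===== SOURCE A (Python) =====
-- def sumTuples(tuple1 : tuple, tuple2 : tuple, length : bool = False) -> tuple:
--   """입력된 튜플의 요소들을 각각 더해주는 함수
--
--   Args:
--       tuple1 (tuple): 첫번째 튜플
--       tuple2 (tuple): 두번째 튜플
--       length (bool): 튜플의 요소들에서 각각 1을 뺄지 여부
--
--   Returns:
--       tuple: 더한 결과 튜플
--   """
--   result = []
--   if len(tuple1) > len(tuple2):
--     a = len(tuple1)-len(tuple2)
--     for i in range(a):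
--       result.append(tuple1[i])
--     for i in range(a, len(tuple1)):
--       if(length):
--         result.append(tuple1[i]+tuple2[i-a]-1)
--       else:
--         result.append(tuple1[i] + tuple2[i-a])
--   else:
--     a = len(tuple2)-len(tuple1)
--     for i in range(a):
--       result.append(tuple2[i])
--     for i in range(a, len(tuple2)):
--       if(length):
--         result.append(tuple2[i]+tuple1[i-a]-1)
--       else:
--         result.append(tuple1[i-a] + tuple2[i])
--   return tuple(result)
-- ===== SOURCE B (Python) =====
-- def sumTuples(tuple1: tuple, tuple2: tuple, length: bool = False) -> tuple:
--     """End-aligned element-wise sum: work on the reversed sequences, sum the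
--     overlapping region in one comprehension (minus 1 when length), pass the
--     unmatched prefix through untouched; no longer/shorter branch, no offset
--     arithmetic."""
--     d = 1 if length else 0
--     xs = tuple1[::-1]
--     ys = tuple2[::-1]
--     n = min(len(xs), len(ys))
--     out = [xs[i] + ys[i] - d for i in range(n)]
--     out.extend(xs[n:])
--     out.extend(ys[n:])
--     out.reverse()
--     return tuple(out)
-- ===== Notes on version B (the rewrite author's own statement) =====
-- stated objective: simpler
-- what changed: Replaced the longer/shorter branch with its prefix-copy loop plus offset-indexed second loop by a single end-aligned recursion over the two reversed sequences that pairs overlapping elements and passes the unmatched prefix through.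
import Mathlib
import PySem

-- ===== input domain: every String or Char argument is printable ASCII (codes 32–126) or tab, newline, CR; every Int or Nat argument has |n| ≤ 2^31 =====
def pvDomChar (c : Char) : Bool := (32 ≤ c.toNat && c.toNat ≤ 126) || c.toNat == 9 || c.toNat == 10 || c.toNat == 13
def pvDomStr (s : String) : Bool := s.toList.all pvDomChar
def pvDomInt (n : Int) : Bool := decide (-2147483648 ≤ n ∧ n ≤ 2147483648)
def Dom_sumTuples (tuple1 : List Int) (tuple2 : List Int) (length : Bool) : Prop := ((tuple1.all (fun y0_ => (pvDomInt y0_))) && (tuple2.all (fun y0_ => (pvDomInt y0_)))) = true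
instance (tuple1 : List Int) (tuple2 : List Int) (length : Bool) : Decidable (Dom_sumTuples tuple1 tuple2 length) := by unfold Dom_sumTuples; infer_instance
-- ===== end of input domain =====

-- B replaces A's longer/shorter branch, prefix-copy loop and offset-indexed loop by one
-- end-aligned recursion over the reversed sequences (simpler decomposition, same cost).

-- ===== PORT A =====
def sumTuples (tuple1 : List Int) (tuple2 : List Int) (length : Bool) : List Int :=
  let result : List Int := []
  if tuple1.length > tuple2.length then
    let a : Int := (tuple1.length : Int) - (tuple2.length : Int)
    let result := (PySem.List.pyRange 0 a 1).foldl
      (fun acc i => acc ++ [PySem.List.pyGetD tuple1 i 0]) result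
    let result := (PySem.List.pyRange a (tuple1.length : Int) 1).foldl
      (fun acc i =>
        if length then
          acc ++ [PySem.List.pyGetD tuple1 i 0 + PySem.List.pyGetD tuple2 (i - a) 0 - 1]
        else
          acc ++ [PySem.List.pyGetD tuple1 i 0 + PySem.List.pyGetD tuple2 (i - a) 0]) result
    result
  else
    let a : Int := (tuple2.length : Int) - (tuple1.length : Int)
    let result := (PySem.List.pyRange 0 a 1).foldl
      (fun acc i => acc ++ [PySem.List.pyGetD tuple2 i 0]) result
    let result := (PySem.List.pyRange a (tuple2.length : Int) 1).foldl
      (fun acc i =>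
        if length then
          acc ++ [PySem.List.pyGetD tuple2 i 0 + PySem.List.pyGetD tuple1 (i - a) 0 - 1]
        else
          acc ++ [PySem.List.pyGetD tuple1 (i - a) 0 + PySem.List.pyGetD tuple2 i 0]) result
    result

-- ===== PORT B =====
def sumTuples_alt (tuple1 : List Int) (tuple2 : List Int) (length : Bool) : List Int :=
  let d : Int := if length then 1 else 0
  let xs := tuple1.reverse
  let ys := tuple2.reverse
  let n : Nat := min xs.length ys.length
  let out := (PySem.List.pyRange 0 (n : Int) 1).map
    (fun i => PySem.List.pyGetD xs i 0 + PySem.List.pyGetD ys i 0 - d)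
  let out := out ++ PySem.List.slice xs (some (n : Int)) none
  let out := out ++ PySem.List.slice ys (some (n : Int)) none
  out.reverse

-- ===== PRECONDITION & SPEC =====
def Spec_sumTuples (tuple1 : List Int) (tuple2 : List Int) (length : Bool) (out : List Int) : Prop := out = sumTuples_alt tuple1 tuple2 length
instance (tuple1 : List Int) (tuple2 : List Int) (length : Bool) (out : List Int) : Decidable (Spec_sumTuples tuple1 tuple2 length out) := by unfold Spec_sumTuples; infer_instance

-- ===== CLAIM (what is proved, stated in full; the proofs are below) =====
def Claim_equal_sumTuples : Prop := ∀ (tuple1 : List Int) (tuple2 : List Int) (length : Bool), Dom_sumTuples tuple1 tuple2 length → Spec_sumTuples tuple1 tuple2 length (sumTuples tuple1 tuple2 length)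

-- ===== LEMMAS AND PROOFS =====

-- prefix-copy loop of A, in closed form
theorem map_range_getD_take (xs : List Int) (n : Nat) (h : n ≤ xs.length) :
    (List.range n).map (fun k => xs.getD k 0) = xs.take n := by
  induction n with
  | zero => simp
  | succ m ih =>
    rw [List.range_succ, List.map_append, ih (by omega), List.take_succ]
    simp [List.getD_eq_getElem?_getD, List.getElem?_eq_getElem (by omega : m < xs.length)]

-- offset loop of A, in closed form
theorem map_range_getD_zip (f : Int → Int → Int) (xs ys : List Int) (a : Nat)
    (h : a + ys.length = xs.length) :
    (List.range ys.length).map (fun k => f (xs.getD (a + k) 0) (ys.getD k 0)) =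
      List.zipWith f (xs.drop a) ys := by
  apply List.ext_getElem
  · simp; omega
  · intro k h1 h2
    have hk : k < ys.length := by simpa using h1
    have hax : a + k < xs.length := by omega
    simp [List.getD_eq_getElem?_getD, List.getElem?_eq_getElem hax,
      List.getElem?_eq_getElem hk, List.getElem_drop]

-- end-aligned zip of the reverses, un-reversed
theorem zipWith_reverse_reverse (f : Int → Int → Int) (xs ys : List Int) :
    (List.zipWith f xs.reverse ys.reverse).reverse =
      List.zipWith f (xs.drop (xs.length - ys.length)) (ys.drop (ys.length - xs.length)) := by
  rw [List.zipWith_eq_zipWith_take_min]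
  simp only [List.length_reverse, List.take_reverse]
  rw [← List.reverse_zipWith (by simp; omega), List.reverse_reverse]
  congr 2 <;> omega

-- drop at the min length is drop at the other list's length
theorem drop_min_eq (p q : List Int) :
    p.drop (min p.length q.length) = p.drop q.length := by
  rcases le_total p.length q.length with h | h
  · rw [min_eq_left h, List.drop_eq_nil_of_le (le_refl _), List.drop_eq_nil_of_le h]
  · rw [min_eq_right h]

-- the overlap comprehension is a zipWith
theorem map_pyRange_min_zip (f : Int → Int → Int) (xs ys : List Int) :
    (PySem.List.pyRange 0 ((min xs.length ys.length : Nat) : Int) 1).map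
      (fun i => f (PySem.List.pyGetD xs i 0) (PySem.List.pyGetD ys i 0)) =
      List.zipWith f xs ys := by
  rw [PySem.List.pyRange_one]
  apply List.ext_getElem
  · simp; omega
  · intro k h1 h2
    have hk1 : k < xs.length := by simp at h1; omega
    have hk2 : k < ys.length := by simp at h1; omega
    simp [List.getD_eq_getElem?_getD, List.getElem?_eq_getElem hk1,
      List.getElem?_eq_getElem hk2]

-- B in fully closed form
theorem alt_closed (tuple1 tuple2 : List Int) (d : Int) :
    ((PySem.List.pyRange 0 ((min tuple1.reverse.length tuple2.reverse.length : Nat) : Int) 1).map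
        (fun i => PySem.List.pyGetD tuple1.reverse i 0 + PySem.List.pyGetD tuple2.reverse i 0 - d) ++
      PySem.List.slice tuple1.reverse
        (some ((min tuple1.reverse.length tuple2.reverse.length : Nat) : Int)) none ++
      PySem.List.slice tuple2.reverse
        (some ((min tuple1.reverse.length tuple2.reverse.length : Nat) : Int)) none).reverse =
      (if tuple2.length ≤ tuple1.length then tuple1.take (tuple1.length - tuple2.length)
        else tuple2.take (tuple2.length - tuple1.length)) ++
      List.zipWith (fun x y => x + y - d)
        (tuple1.drop (tuple1.length - tuple2.length))
        (tuple2.drop (tuple2.length - tuple1.length)) := by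
  rw [map_pyRange_min_zip (fun x y => x + y - d) tuple1.reverse tuple2.reverse,
      PySem.List.slice_from_natCast, PySem.List.slice_from_natCast,
      drop_min_eq tuple1.reverse tuple2.reverse]
  rw [show min tuple1.reverse.length tuple2.reverse.length =
        min tuple2.reverse.length tuple1.reverse.length from Nat.min_comm _ _,
      drop_min_eq tuple2.reverse tuple1.reverse]
  simp only [List.reverse_append, List.length_reverse, List.drop_reverse,
    List.reverse_reverse]
  rw [zipWith_reverse_reverse]
  rcases le_or_gt tuple2.length tuple1.length with hle | hgt
  · rw [if_pos hle]
    have h1 : tuple2.take (tuple2.length - tuple1.length) = [] := by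
      simp [Nat.sub_eq_zero_of_le hle]
    rw [h1]
    simp
  · rw [if_neg (by omega)]
    have h1 : tuple1.take (tuple1.length - tuple2.length) = [] := by
      simp [Nat.sub_eq_zero_of_le (le_of_lt hgt)]
    rw [h1]
    simp

-- A's first loop (prefix copy) in closed form
theorem mapA_take (xs : List Int) (a : Int) (_ha : 0 ≤ a) (hle : a.toNat ≤ xs.length) :
    (PySem.List.pyRange 0 a 1).map (fun i => PySem.List.pyGetD xs i 0) = xs.take a.toNat := by
  rw [PySem.List.pyRange_one, List.map_map]
  simp only [sub_zero]
  rw [← map_range_getD_take xs a.toNat hle]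
  apply List.map_congr_left
  intro k hk
  simp [Function.comp]

-- A's second loop (offset-indexed sum) in closed form
theorem mapA_zip (f : Int → Int → Int) (xs ys : List Int) (h : ys.length ≤ xs.length) :
    (PySem.List.pyRange ((xs.length : Int) - (ys.length : Int)) (xs.length : Int) 1).map
      (fun i => f (PySem.List.pyGetD xs i 0)
                  (PySem.List.pyGetD ys (i - ((xs.length : Int) - (ys.length : Int))) 0)) =
      List.zipWith f (xs.drop (xs.length - ys.length)) ys := by
  rw [PySem.List.pyRange_one, List.map_map]
  have hb : ((xs.length : Int) - ((xs.length : Int) - (ys.length : Int))).toNat = ys.length := by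
    omega
  rw [hb, ← map_range_getD_zip f xs ys (xs.length - ys.length) (by omega)]
  apply List.map_congr_left
  intro k hk
  have h1 : (xs.length : Int) - (ys.length : Int) + (k : Int) =
      ((xs.length - ys.length + k : ℕ) : Int) := by push_cast; omega
  have h3 : ((xs.length - ys.length + k : ℕ) : Int) -
      ((xs.length : Int) - (ys.length : Int)) = (k : Int) := by push_cast; omega
  simp only [Function.comp, h1, h3, PySem.List.pyGetD_natCast]

-- both loops of one branch of A, in closed form
theorem A_side (f : Int → Int → Int) (xs ys : List Int) (h : ys.length ≤ xs.length) :
    (PySem.List.pyRange ((xs.length : Int) - (ys.length : Int)) (xs.length : Int) 1).foldl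
      (fun acc i => acc ++ [f (PySem.List.pyGetD xs i 0)
        (PySem.List.pyGetD ys (i - ((xs.length : Int) - (ys.length : Int))) 0)])
      ((PySem.List.pyRange 0 ((xs.length : Int) - (ys.length : Int)) 1).foldl
        (fun acc i => acc ++ [PySem.List.pyGetD xs i 0]) []) =
    xs.take (xs.length - ys.length) ++ List.zipWith f (xs.drop (xs.length - ys.length)) ys := by
  rw [PySem.List.foldl_append_singleton_eq_map, PySem.List.foldl_append_singleton_eq_map,
      List.nil_append, mapA_take xs _ (by omega) (by omega), mapA_zip f xs ys h]
  congr 2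
  omega

-- swap the operand lists of a zipWith of a sum
theorem zipWith_sub_comm (d : Int) (xs ys : List Int) :
    List.zipWith (fun x y => x + y - d) xs ys = List.zipWith (fun x y => x + y - d) ys xs := by
  rw [List.zipWith_comm]
  congr 1
  funext x y
  ring

-- ===== VERDICT (by name: the statement is the Claim_ definition above) =====
theorem sumTuples_spec : Claim_equal_sumTuples := by
  intro t1 t2 L _
  unfold Spec_sumTuples sumTuples sumTuples_alt
  rw [alt_closed]
  by_cases hgt : t1.length > t2.length
  · rw [if_pos hgt, if_pos (le_of_lt hgt)]
    have h2 : t2.drop (t2.length - t1.length) = t2 := by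
      simp [Nat.sub_eq_zero_of_le (le_of_lt hgt)]
    rw [h2]
    cases L
    · simp only [Bool.false_eq_true, if_false, sub_zero]
      exact A_side (fun x y => x + y) t1 t2 (le_of_lt hgt)
    · simp only [if_true]
      exact A_side (fun x y => x + y - 1) t1 t2 (le_of_lt hgt)
  · have hle : t1.length ≤ t2.length := by omega
    rw [if_neg hgt]
    have hBif : (if t2.length ≤ t1.length then t1.take (t1.length - t2.length)
        else t2.take (t2.length - t1.length)) = t2.take (t2.length - t1.length) := by
      split_ifs with h
      · have he : t1.length = t2.length := by omega
        rw [he]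
        simp
      · rfl
    rw [hBif]
    have h1 : t1.drop (t1.length - t2.length) = t1 := by
      simp [Nat.sub_eq_zero_of_le hle]
    rw [h1]
    cases L
    · simp only [Bool.false_eq_true, if_false, sub_zero]
      rw [List.zipWith_comm (f := fun x y : Int => x + y) (as := t1)
            (bs := t2.drop (t2.length - t1.length))]
      exact A_side (fun x y => y + x) t2 t1 hle
    · simp only [if_true]
      rw [zipWith_sub_comm 1 t1 (t2.drop (t2.length - t1.length))]
      exact A_side (fun x y => x + y - 1) t2 t1 hle
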